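-- pv_equiv track=rewrite | github.com/pradibta4/Encrypt-Decrypt-Website | app/sbox_metrics.py | boolean_correlation_immunity
-- ===== SOURCE A (Python) =====
-- from typing import Dict, List
--
-- def _walsh_hadamard_transform(vec: List[int]) -> List[int]:
--     """In-place fast Walsh-Hadamard transform (copy is returned)."""
--     n = len(vec)
--     h = vec[:]
--     step = 1
--     while step < n:
--         jump = step * 2
--         for i in range(0, n, jump):
--             for j in range(i, i + step):
--                 x = h[j]
--                 y = h[j + step]
--                 h[j] = x + y
--                 h[j + step] = x - y
--         step = jump
--     return h
--
-- def boolean_walsh(truth_table: List[int]) -> List[int]: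
--     """Walsh spectrum for a Boolean function truth table (0/1 values)."""
--     spectrum_input = [1 if bit == 0 else -1 for bit in truth_table]
--     return _walsh_hadamard_transform(spectrum_input)
--
-- def boolean_correlation_immunity(truth_table: List[int]) -> int:
--     n = len(truth_table).bit_length() - 1
--     walsh = boolean_walsh(truth_table)
--     ci = 0
--     for order in range(1, n + 1):
--         if any(
--             walsh[mask] != 0
--             for mask in range(1, 1 << n)
--             if 1 <= mask.bit_count() <= order
--         ):
--             break
--         ci = order
--     return ci
-- ===== SOURCE B (Python) =====
-- from typing import List
--
-- def _wht_recursive(vec: List[int]) -> List[int]: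
--     """Walsh-Hadamard transform by divide and conquer on the two halves."""
--     if len(vec) <= 1:
--         return list(vec)
--     half = len(vec) // 2
--     a = _wht_recursive(vec[:half])
--     b = _wht_recursive(vec[half:])
--     return [x + y for x, y in zip(a, b)] + [x - y for x, y in zip(a, b)]
--
-- def boolean_correlation_immunity(truth_table: List[int]) -> int:
--     walsh = _wht_recursive([1 if bit == 0 else -1 for bit in truth_table])
--     n = len(truth_table).bit_length() - 1
--     ci = n
--     for mask in range(1, len(walsh)):
--         if walsh[mask] != 0:
--             ci = min(ci, bin(mask).count("1") - 1)
--     return ci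
-- ===== Notes on version B (the rewrite author's own statement) =====
-- stated objective: alternative
-- what changed: Replaces the iterative in-place butterfly WHT plus the per-order rescan loop by a recursive divide-and-conquer WHT (split, recurse on halves, combine with zipped sums/differences) followed by a single pass tracking the minimum popcount of a nonzero Walsh coefficient (result = that minimum minus 1, default n).
-- outside the precondition, e.g. on boolean_correlation_immunity([]): A returns 0, B returns -1
import Mathlib
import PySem

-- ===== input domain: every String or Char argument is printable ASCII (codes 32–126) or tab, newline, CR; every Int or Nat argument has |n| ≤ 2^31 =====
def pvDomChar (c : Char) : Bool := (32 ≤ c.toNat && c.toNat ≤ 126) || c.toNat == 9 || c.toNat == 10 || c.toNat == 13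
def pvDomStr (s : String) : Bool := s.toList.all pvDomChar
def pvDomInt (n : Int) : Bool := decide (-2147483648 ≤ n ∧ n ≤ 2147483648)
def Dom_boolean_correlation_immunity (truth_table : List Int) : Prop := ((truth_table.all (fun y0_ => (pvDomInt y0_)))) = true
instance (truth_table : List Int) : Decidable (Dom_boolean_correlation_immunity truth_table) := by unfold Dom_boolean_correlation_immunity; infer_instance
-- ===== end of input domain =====

-- B replaces A's iterative in-place butterfly WHT and per-order rescan by a recursive
-- divide-and-conquer WHT and a single min-popcount pass (objective: alternative).

-- ===== PORT A =====
-- Python int.bit_length() for a natural number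
def pyBitLength (m : Nat) : Nat := if m = 0 then 0 else Nat.log2 m + 1

-- Python popcount (mask.bit_count() in A, bin(mask).count("1") in B);
-- fuel-guarded structural recursion (fuel m always suffices)
def pcountAux : Nat → Nat → Nat
  | 0, _ => 0
  | f + 1, m => if m = 0 then 0 else m % 2 + pcountAux f (m / 2)

def pcount (m : Nat) : Nat := pcountAux m m

-- body of the inner 'for j' loop; h[j] / h[j+step] ported as getD (indices are
-- always in range on Pre_, where the length is a power of two)
def whtInner (step : Nat) (h : List Int) (j : Nat) : List Int :=
  let x := h.getD j 0
  let y := h.getD (j + step) 0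
  (h.set j (x + y)).set (j + step) (x - y)

-- 'for j in range(i, i + step)'
def whtBlock (step : Nat) (h : List Int) (i : Nat) : List Int :=
  (List.range' i step).foldl (whtInner step) h

-- the 'while step < n' loop; fuel-guarded (step doubles from 1, so fuel n suffices);
-- range(0, n, jump) = List.range' 0 ⌈n/jump⌉ jump
def whtWhileAux : Nat → Nat → Nat → List Int → List Int
  | 0, _, _, h => h
  | f + 1, n, step, h =>
    if step < n then
      let jump := step * 2
      let h' := (List.range' 0 ((n + jump - 1) / jump) jump).foldl (whtBlock step) h
      whtWhileAux f n jump h'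
    else h

def walshHadamardTransform (vec : List Int) : List Int :=
  whtWhileAux vec.length vec.length 1 vec

def boolean_walsh (truth_table : List Int) : List Int :=
  walshHadamardTransform (truth_table.map (fun bit => if bit = 0 then (1 : Int) else -1))

-- 'any(walsh[mask] != 0 for mask in range(1, 1 << n) if 1 <= mask.bit_count() <= order)'
def anyNZ (walsh : List Int) (n order : Int) : Bool :=
  (List.range' 1 (2 ^ n.toNat - 1)).any (fun mask =>
    (decide ((1 : Int) ≤ (pcount mask : Int)) && decide ((pcount mask : Int) ≤ order))
      && decide (walsh.getD mask 0 ≠ 0))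

-- 'for order in range(1, n + 1): … break … ; ci = order'  (fuel n.toNat covers all orders)
def ciLoopAux : Nat → List Int → Int → Int → Int → Int
  | 0, _, _, _, ci => ci
  | f + 1, walsh, n, order, ci =>
    if order < n + 1 then
      if anyNZ walsh n order then ci
      else ciLoopAux f walsh n (order + 1) order
    else ci

def boolean_correlation_immunity (truth_table : List Int) : Int :=
  let n : Int := (pyBitLength truth_table.length : Int) - 1
  let walsh := boolean_walsh truth_table
  ciLoopAux n.toNat walsh n 1 0

-- ===== PORT B =====
-- recursive divide-and-conquer WHT: recurse on the two halves, then combine with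
-- element-wise sums and differences (Source B's _wht_recursive)
def whtRec (vec : List Int) : List Int :=
  if _h : vec.length ≤ 1 then vec
  else
    let half := vec.length / 2
    let a := whtRec (vec.take half)
    let b := whtRec (vec.drop half)
    (List.zipWith (· + ·) a b) ++ (List.zipWith (· - ·) a b)
termination_by vec.length
decreasing_by
  · simp only [List.length_take]; omega
  · simp only [List.length_drop]; omega

def boolean_correlation_immunity_alt (truth_table : List Int) : Int :=
  let walsh := whtRec (truth_table.map (fun bit => if bit = 0 then (1 : Int) else -1))
  let n : Int := (pyBitLength truth_table.length : Int) - 1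
  (List.range' 1 (walsh.length - 1)).foldl
    (fun ci mask =>
      if walsh.getD mask 0 ≠ 0 then min ci ((pcount mask : Int) - 1) else ci) n

-- ===== PRECONDITION & SPEC =====
-- Pre_ admits exactly the power-of-two-length tables: on any other length ≥ 3 the
-- Python A raises IndexError inside the WHT, and on the empty table (the only
-- excluded input on which A returns) there is no Boolean function at all, so A's 0
-- and B's -1 are equally arbitrary conventions for that degenerate corner.
def Pre_boolean_correlation_immunity (truth_table : List Int) : Prop :=
  truth_table.length = 2 ^ Nat.log2 truth_table.length
instance (truth_table : List Int) : Decidable (Pre_boolean_correlation_immunity truth_table) := by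
  unfold Pre_boolean_correlation_immunity; infer_instance

def pvWitness_boolean_correlation_immunity : List Int := [0, 1, 1, 0]

def Spec_boolean_correlation_immunity (truth_table : List Int) (out : Int) : Prop := out = boolean_correlation_immunity_alt truth_table
instance (truth_table : List Int) (out : Int) : Decidable (Spec_boolean_correlation_immunity truth_table out) := by unfold Spec_boolean_correlation_immunity; infer_instance

-- ===== CLAIM (what is proved, stated in full; the proofs are below) =====
def Claim_equal_boolean_correlation_immunity : Prop := ∀ (truth_table : List Int), Dom_boolean_correlation_immunity truth_table → Pre_boolean_correlation_immunity truth_table → Spec_boolean_correlation_immunity truth_table (boolean_correlation_immunity truth_table)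

-- ===== LEMMAS AND PROOFS =====

theorem pcountAux_congr : ∀ (f f' m : Nat), m ≤ f → m ≤ f' →
    pcountAux f m = pcountAux f' m := by
  intro f
  induction f with
  | zero =>
    intro f' m hf hf'
    have : m = 0 := by omega
    subst this
    cases f' <;> simp [pcountAux]
  | succ f ih =>
    intro f' m hf hf'
    cases f' with
    | zero =>
      have : m = 0 := by omega
      subst this
      simp [pcountAux]
    | succ f' =>
      by_cases hm : m = 0
      · subst hm; simp [pcountAux]
      · simp only [pcountAux, if_neg hm]
        have h2 : m / 2 ≤ f := by omega
        have h2' : m / 2 ≤ f' := by omega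
        rw [ih f' (m / 2) h2 h2']

theorem pcount_eq (m : Nat) :
    pcount m = if m = 0 then 0 else m % 2 + pcount (m / 2) := by
  by_cases hm : m = 0
  · subst hm; simp [pcount, pcountAux]
  · rw [if_neg hm]
    obtain ⟨m', rfl⟩ : ∃ m', m = m' + 1 := ⟨m - 1, by omega⟩
    show pcountAux (m' + 1) (m' + 1) = _
    simp only [pcountAux, if_neg hm]
    rw [pcountAux_congr m' ((m' + 1) / 2) ((m' + 1) / 2) (by omega) (le_refl _)]
    rfl

theorem pcount_pos (m : Nat) (hm : 1 ≤ m) : 1 ≤ pcount m := by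
  induction m using Nat.strong_induction_on with
  | _ m ih =>
    rw [pcount_eq]
    split
    · omega
    · rename_i h
      rcases Nat.even_or_odd m with he | ho
      · have hm2 : m % 2 = 0 := Nat.even_iff.mp he
        have h2 : 1 ≤ m / 2 := by omega
        have := ih (m / 2) (by omega) h2
        omega
      · have : m % 2 = 1 := Nat.odd_iff.mp ho
        omega

theorem pcount_le (k : Nat) : ∀ m, m < 2 ^ k → pcount m ≤ k := by
  induction k with
  | zero => intro m hm; interval_cases m; simp [pcount, pcountAux]
  | succ k ih =>
    intro m hm
    rw [pcount_eq]
    split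
    · omega
    · have hdiv : m / 2 < 2 ^ k := by
        rw [Nat.div_lt_iff_lt_mul (by norm_num)]
        calc m < 2 ^ (k + 1) := hm
        _ = 2 ^ k * 2 := by ring
      have := ih (m / 2) hdiv
      omega

theorem whtInner_length (step : Nat) (h : List Int) (j : Nat) :
    (whtInner step h j).length = h.length := by
  simp [whtInner]

theorem foldl_length {α : Type} (g : List Int → α → List Int)
    (hg : ∀ h a, (g h a).length = h.length) :
    ∀ (l : List α) (h : List Int), (l.foldl g h).length = h.length := by
  intro l
  induction l with
  | nil => intro h; rfl
  | cons a l ih => intro h; simp only [List.foldl_cons]; rw [ih, hg]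

theorem whtBlock_length (step : Nat) (h : List Int) (i : Nat) :
    (whtBlock step h i).length = h.length := by
  simp only [whtBlock]
  exact foldl_length _ (whtInner_length step) _ h

theorem whtWhileAux_length : ∀ (f n step : Nat) (h : List Int),
    (whtWhileAux f n step h).length = h.length := by
  intro f
  induction f with
  | zero => intro n step h; rfl
  | succ f ih =>
    intro n step h
    simp only [whtWhileAux]
    split
    · rw [ih]
      exact foldl_length _ (whtBlock_length _) _ _
    · rfl

theorem boolean_walsh_length (tt : List Int) :
    (boolean_walsh tt).length = tt.length := by
  simp [boolean_walsh, walshHadamardTransform, whtWhileAux_length]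

-- ---- the single pass of A's while loop, as a named function ----
def Ppass (s n : Nat) (h : List Int) : List Int :=
  (List.range' 0 ((n + s * 2 - 1) / (s * 2)) (s * 2)).foldl (whtBlock s) h

theorem Ppass_length (s n : Nat) (h : List Int) : (Ppass s n h).length = h.length := by
  simp only [Ppass]
  exact foldl_length _ (whtBlock_length _) _ _

theorem whtWhileAux_succ (f n s : Nat) (h : List Int) :
    whtWhileAux (f + 1) n s h =
      if s < n then whtWhileAux f n (s * 2) (Ppass s n h) else h := by
  rfl

theorem whtWhileAux_stop (f n s : Nat) (h : List Int) (hs : ¬ s < n) :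
    whtWhileAux f n s h = h := by
  cases f with
  | zero => rfl
  | succ f => simp [whtWhileAux, hs]

-- ---- shift lemmas: a butterfly entirely inside one half of an append ----
theorem whtInner_left (s : Nat) (a b : List Int) (j : Nat) (hj : j + s < a.length) :
    whtInner s (a ++ b) j = whtInner s a j ++ b := by
  simp only [whtInner]
  rw [List.getD_append a b 0 j (by omega), List.getD_append a b 0 (j + s) hj]
  rw [List.set_append_left _ _ (by omega)]
  rw [List.set_append_left _ _ (by simp only [List.length_set]; omega)]

theorem whtInner_right (s : Nat) (a b : List Int) (j : Nat) :
    whtInner s (a ++ b) (a.length + j) = a ++ whtInner s b j := by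
  simp only [whtInner]
  rw [List.getD_append_right a b 0 (a.length + j) (by omega)]
  rw [List.getD_append_right a b 0 (a.length + j + s) (by omega)]
  rw [List.set_append_right _ _ (by omega)]
  rw [List.set_append_right _ _ (by omega)]
  rw [show a.length + j - a.length = j by omega]
  rw [show a.length + j + s - a.length = j + s by omega]

theorem whtBlock_left (s : Nat) (a b : List Int) (i : Nat) (hi : i + s + s ≤ a.length) :
    whtBlock s (a ++ b) i = whtBlock s a i ++ b := by
  unfold whtBlock
  have main : ∀ (m : Nat) (a : List Int) (i : Nat), i + m + s ≤ a.length →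
      (List.range' i m).foldl (whtInner s) (a ++ b) =
        (List.range' i m).foldl (whtInner s) a ++ b := by
    intro m
    induction m with
    | zero => intro a i _; simp
    | succ m ih =>
      intro a i hm
      rw [List.range'_succ, List.foldl_cons, List.foldl_cons]
      rw [whtInner_left s a b i (by omega)]
      exact ih (whtInner s a i) (i + 1) (by rw [whtInner_length]; omega)
  exact main s a i hi

theorem whtBlock_right (s : Nat) (a b : List Int) (i : Nat) :
    whtBlock s (a ++ b) (a.length + i) = a ++ whtBlock s b i := by
  unfold whtBlock
  have main : ∀ (m : Nat) (b : List Int) (i : Nat),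
      (List.range' (a.length + i) m).foldl (whtInner s) (a ++ b) =
        a ++ (List.range' i m).foldl (whtInner s) b := by
    intro m
    induction m with
    | zero => intro b i; simp
    | succ m ih =>
      intro b i
      rw [List.range'_succ, List.range'_succ, List.foldl_cons, List.foldl_cons]
      rw [whtInner_right s a b i]
      have := ih (whtInner s b i) (i + 1)
      rw [show a.length + i + 1 = a.length + (i + 1) by omega]
      exact this
  exact main s b i

-- ---- splitting one pass across the two halves ----
theorem foldl_block_left (s : Nat) (b : List Int) :
    ∀ (c : Nat) (a : List Int) (start : Nat), start + c * (s * 2) ≤ a.length →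
      (List.range' start c (s * 2)).foldl (whtBlock s) (a ++ b) =
        (List.range' start c (s * 2)).foldl (whtBlock s) a ++ b := by
  intro c
  induction c with
  | zero => intro a start _; simp
  | succ c ih =>
    intro a start h
    have hexp : (c + 1) * (s * 2) = c * (s * 2) + s * 2 := by ring
    rw [List.range'_succ, List.foldl_cons, List.foldl_cons]
    rw [whtBlock_left s a b start (by omega)]
    exact ih (whtBlock s a start) (start + s * 2) (by rw [whtBlock_length]; omega)

theorem foldl_block_right (s : Nat) (a : List Int) :
    ∀ (c : Nat) (b : List Int) (i : Nat),
      (List.range' (a.length + i) c (s * 2)).foldl (whtBlock s) (a ++ b) =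
        a ++ (List.range' i c (s * 2)).foldl (whtBlock s) b := by
  intro c
  induction c with
  | zero => intro b i; simp
  | succ c ih =>
    intro b i
    rw [List.range'_succ, List.range'_succ, List.foldl_cons, List.foldl_cons]
    rw [whtBlock_right s a b i]
    have := ih (whtBlock s b i) (i + s * 2)
    rw [show a.length + i + s * 2 = a.length + (i + s * 2) by omega]
    exact this

theorem ceil_div_mul (s c : Nat) (hs : 0 < s) : (c * s + s - 1) / s = c := by
  have h1 : c * s + s - 1 = s * c + (s - 1) := by
    have h2 : c * s = s * c := by ring
    omega
  rw [h1, Nat.mul_add_div hs, Nat.div_eq_of_lt (by omega)]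
  omega

theorem Ppass_split (s L : Nat) (a b : List Int) (hs : 0 < s) (hdvd : s * 2 ∣ L)
    (hsL : s * 2 ≤ L) (ha : a.length = L) (hb : b.length = L) :
    Ppass s (2 * L) (a ++ b) = Ppass s L a ++ Ppass s L b := by
  obtain ⟨c, hc⟩ := hdvd
  have hcnt2 : (2 * L + s * 2 - 1) / (s * 2) = 2 * c := by
    have hp : 2 * L = (2 * c) * (s * 2) := by rw [hc]; ring
    rw [show 2 * L + s * 2 - 1 = (2 * c) * (s * 2) + (s * 2) - 1 by omega]
    exact ceil_div_mul (s * 2) (2 * c) (by omega)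
  have hcnt1 : (L + s * 2 - 1) / (s * 2) = c := by
    have hp : L = c * (s * 2) := by rw [hc]; ring
    rw [show L + s * 2 - 1 = c * (s * 2) + (s * 2) - 1 by omega]
    exact ceil_div_mul (s * 2) c (by omega)
  unfold Ppass
  rw [hcnt2, hcnt1]
  have hsplit : List.range' 0 (2 * c) (s * 2) =
      List.range' 0 c (s * 2) ++ List.range' (0 + (s * 2) * c) c (s * 2) := by
    rw [List.range'_append]
    congr 1
    omega
  rw [hsplit, List.foldl_append]
  rw [foldl_block_left s b c a 0 (by rw [ha, hc]; ring_nf; omega)]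
  have hlen : ((List.range' 0 c (s * 2)).foldl (whtBlock s) a).length = L := by
    rw [foldl_length _ (whtBlock_length s), ha]
  rw [show 0 + s * 2 * c = ((List.range' 0 c (s * 2)).foldl (whtBlock s) a).length + 0 by
    rw [hlen, hc]; ring]
  rw [foldl_block_right s _ c b 0]

-- ---- the top pass: one block of butterflies is the zipWith combine ----
theorem top_block_aux (s : Nat) :
    ∀ (a b u v : List Int), u.length = v.length → a.length = b.length →
      s = u.length + a.length → v.length + b.length = s →
      (List.range' u.length a.length).foldl (whtInner s) ((u ++ a) ++ (v ++ b)) =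
        (u ++ List.zipWith (· + ·) a b) ++ (v ++ List.zipWith (· - ·) a b) := by
  intro a
  induction a with
  | nil =>
    intro b u v huv hab hs hvb
    have hb : b = [] := by
      cases b with
      | nil => rfl
      | cons _ _ => simp at hab
    subst hb; simp
  | cons x a ih =>
    intro b u v huv hab hs hvb
    cases b with
    | nil => simp at hab
    | cons y b =>
      have hab' : a.length = b.length := by simpa using hab
      have hs' : s = u.length + a.length + 1 := by
        simp only [List.length_cons] at hs; omega
      have hvb' : v.length + b.length + 1 = s := by
        simp only [List.length_cons] at hvb; omega
      simp only [List.length_cons, List.range'_succ, List.foldl_cons]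
      have hstep : whtInner s ((u ++ x :: a) ++ (v ++ y :: b)) u.length =
          ((u ++ [x + y]) ++ a) ++ ((v ++ [x - y]) ++ b) := by
        simp only [whtInner]
        rw [List.getD_append (u ++ x :: a) (v ++ y :: b) 0 u.length
          (by simp only [List.length_append, List.length_cons]; omega)]
        rw [List.getD_append_right (u ++ x :: a) (v ++ y :: b) 0 (u.length + s)
          (by simp only [List.length_append, List.length_cons]; omega)]
        rw [List.getD_append_right u (x :: a) 0 u.length (le_refl _)]
        rw [show u.length + s - (u ++ x :: a).length = v.length by
          simp only [List.length_append, List.length_cons]; omega]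
        rw [List.getD_append_right v (y :: b) 0 v.length (le_refl _)]
        simp only [Nat.sub_self, List.getD_cons_zero]
        rw [List.set_append_left _ _
          (by simp only [List.length_append, List.length_cons]; omega)]
        rw [List.set_append_right _ _
          (by simp only [List.length_append, List.length_cons, List.length_set]; omega)]
        rw [show u.length + s - ((u ++ x :: a).set u.length (x + y)).length = v.length by
          simp only [List.length_set, List.length_append, List.length_cons]; omega]
        rw [List.set_append_right _ _ (le_refl _), List.set_append_right _ _ (le_refl _)]
        simp
      rw [hstep]
      rw [show u.length + 1 = (u ++ [x + y]).length by simp]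
      rw [ih b (u ++ [x + y]) (v ++ [x - y]) (by simp [huv]) hab'
        (by simp only [List.length_append, List.length_cons, List.length_nil]; omega)
        (by simp only [List.length_append, List.length_cons, List.length_nil]; omega)]
      simp [List.append_assoc]

theorem Ppass_top (s : Nat) (a b : List Int) (hs : 0 < s)
    (ha : a.length = s) (hb : b.length = s) :
    Ppass s (2 * s) (a ++ b) =
      List.zipWith (· + ·) a b ++ List.zipWith (· - ·) a b := by
  unfold Ppass
  have hcnt : (2 * s + s * 2 - 1) / (s * 2) = 1 := by
    rw [show 2 * s + s * 2 - 1 = 1 * (s * 2) + (s * 2) - 1 by ring_nf]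
    exact ceil_div_mul (s * 2) 1 (by omega)
  rw [hcnt]
  show whtBlock s (a ++ b) 0 = _
  unfold whtBlock
  have := top_block_aux s a b [] [] rfl (by omega) (by simp [ha]) (by simp [hb])
  simpa [ha] using this

-- ---- the whole while loop splits across the two halves ----
theorem loop_split : ∀ (f k j : Nat) (a b : List Int) (g : Nat), j ≤ k →
    a.length = 2 ^ k → b.length = 2 ^ k →
    2 ^ (k + 1) ≤ 2 ^ j * 2 ^ f → 2 ^ k ≤ 2 ^ j * 2 ^ g →
    whtWhileAux f (2 ^ (k + 1)) (2 ^ j) (a ++ b) =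
      List.zipWith (· + ·) (whtWhileAux g (2 ^ k) (2 ^ j) a) (whtWhileAux g (2 ^ k) (2 ^ j) b)
        ++ List.zipWith (· - ·) (whtWhileAux g (2 ^ k) (2 ^ j) a) (whtWhileAux g (2 ^ k) (2 ^ j) b) := by
  intro f
  induction f with
  | zero =>
    intro k j a b g hjk ha hb hf hg
    exfalso
    simp at hf
    have h1 : 2 ^ j ≤ 2 ^ k := Nat.pow_le_pow_right (by omega) hjk
    have h2 : 2 ^ k < 2 ^ (k + 1) := Nat.pow_lt_pow_right (by omega) (by omega)
    omega
  | succ f ih =>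
    intro k j a b g hjk ha hb hf hg
    have hjlt : 2 ^ j < 2 ^ (k + 1) := Nat.pow_lt_pow_right (by omega) (by omega)
    rw [whtWhileAux_succ, if_pos hjlt]
    by_cases hjk' : j = k
    · subst hjk'
      have htop : Ppass (2 ^ j) (2 ^ (j + 1)) (a ++ b) =
          List.zipWith (· + ·) a b ++ List.zipWith (· - ·) a b := by
        rw [show (2:Nat) ^ (j + 1) = 2 * 2 ^ j by ring]
        exact Ppass_top (2 ^ j) a b (pow_pos (by omega : (0:Nat) < 2) j) ha hb
      rw [htop]
      rw [whtWhileAux_stop _ _ _ _ (by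
        have : (2:Nat) ^ j * 2 = 2 ^ (j + 1) := by ring
        omega)]
      rw [whtWhileAux_stop g _ _ a (by omega), whtWhileAux_stop g _ _ b (by omega)]
    · have hjk2 : j < k := by omega
      have hsplit : Ppass (2 ^ j) (2 ^ (k + 1)) (a ++ b) =
          Ppass (2 ^ j) (2 ^ k) a ++ Ppass (2 ^ j) (2 ^ k) b := by
        rw [show (2:Nat) ^ (k + 1) = 2 * 2 ^ k by ring]
        apply Ppass_split (2 ^ j) (2 ^ k) a b (pow_pos (by omega : (0:Nat) < 2) j) ?_ ?_ ha hb
        · exact ⟨2 ^ (k - j - 1), by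
            rw [show (2:Nat) ^ j * 2 * 2 ^ (k - j - 1) = 2 ^ (j + 1 + (k - j - 1)) by ring]
            congr 1; omega⟩
        · have : (2:Nat) ^ j * 2 = 2 ^ (j + 1) := by ring
          have := Nat.pow_le_pow_right (show 1 ≤ 2 by omega) (show j + 1 ≤ k by omega)
          omega
      rw [hsplit]
      have hg1 : 1 ≤ g := by
        by_contra hcon
        have : g = 0 := by omega
        subst this
        simp at hg
        have := Nat.pow_lt_pow_right (show 1 < 2 by omega) hjk2
        omega
      have hstep2 : (2:Nat) ^ j * 2 = 2 ^ (j + 1) := by ring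
      rw [hstep2]
      have := ih k (j + 1) (Ppass (2 ^ j) (2 ^ k) a) (Ppass (2 ^ j) (2 ^ k) b) (g - 1)
        (by omega)
        (by rw [Ppass_length, ha]) (by rw [Ppass_length, hb])
        (by rw [show (2:Nat) ^ (j+1) * 2 ^ f = 2 ^ j * 2 ^ (f+1) by ring]; exact hf)
        (by
          have : (2:Nat) ^ (j + 1) * 2 ^ (g - 1) = 2 ^ j * 2 ^ g := by
            rw [show (2:Nat) ^ (j+1) * 2 ^ (g-1) = 2 ^ j * (2 * 2 ^ (g-1)) by ring]
            congr 1
            rw [show 2 * 2 ^ (g - 1) = 2 ^ (g - 1 + 1) by ring]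
            congr 1; omega
          omega)
      rw [this]
      have hloopa : whtWhileAux g (2 ^ k) (2 ^ j) a =
          whtWhileAux (g - 1) (2 ^ k) (2 ^ (j + 1)) (Ppass (2 ^ j) (2 ^ k) a) := by
        obtain ⟨g', rfl⟩ : ∃ g', g = g' + 1 := ⟨g - 1, by omega⟩
        rw [whtWhileAux_succ, if_pos (Nat.pow_lt_pow_right (by omega) hjk2), hstep2]
        simp
      have hloopb : whtWhileAux g (2 ^ k) (2 ^ j) b =
          whtWhileAux (g - 1) (2 ^ k) (2 ^ (j + 1)) (Ppass (2 ^ j) (2 ^ k) b) := by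
        obtain ⟨g', rfl⟩ : ∃ g', g = g' + 1 := ⟨g - 1, by omega⟩
        rw [whtWhileAux_succ, if_pos (Nat.pow_lt_pow_right (by omega) hjk2), hstep2]
        simp
      rw [hloopa, hloopb]

-- ---- the iterative WHT equals the recursive WHT on power-of-two lengths ----
theorem whtRec_eq_loop : ∀ (k : Nat) (v : List Int), v.length = 2 ^ k →
    ∀ f, 2 ^ k ≤ 2 ^ f → whtWhileAux f (2 ^ k) 1 v = whtRec v := by
  intro k
  induction k with
  | zero =>
    intro v hv f _
    rw [whtWhileAux_stop _ _ _ _ (by simp)]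
    rw [whtRec]
    rw [dif_pos (by omega)]
  | succ k ih =>
    intro v hv f hf
    have hge2 : 2 ≤ v.length := by
      rw [hv]
      have := Nat.one_lt_two_pow_iff.mpr (show k + 1 ≠ 0 by omega)
      omega
    have hhalf : v.length / 2 = 2 ^ k := by
      rw [hv]; omega
    have hta : (v.take (v.length / 2)).length = 2 ^ k := by
      simp [hhalf]; omega
    have htb : (v.drop (v.length / 2)).length = 2 ^ k := by
      simp [hv]; omega
    have hsplit := loop_split f k 0 (v.take (v.length / 2)) (v.drop (v.length / 2)) f
      (by omega) hta htb (by simpa using hf)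
      (by simp; exact le_trans (Nat.pow_le_pow_right (by omega) (by omega)) hf)
    rw [List.take_append_drop] at hsplit
    simp only [pow_zero] at hsplit
    rw [hsplit]
    rw [ih (v.take (v.length / 2)) hta f (le_trans (Nat.pow_le_pow_right (by omega) (by omega)) hf)]
    rw [ih (v.drop (v.length / 2)) htb f (le_trans (Nat.pow_le_pow_right (by omega) (by omega)) hf)]
    conv_rhs => rw [whtRec]
    rw [dif_neg (by omega)]

-- under Pre_, A's walsh spectrum is B's recursive spectrum
theorem boolean_walsh_eq_rec (tt : List Int)
    (hPre : tt.length = 2 ^ Nat.log2 tt.length) :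
    boolean_walsh tt = whtRec (tt.map (fun bit => if bit = 0 then (1 : Int) else -1)) := by
  unfold boolean_walsh walshHadamardTransform
  set v := tt.map (fun bit => if bit = 0 then (1 : Int) else -1) with hvdef
  have hvl : v.length = tt.length := by simp [hvdef]
  set k := Nat.log2 tt.length with hk
  have hv : v.length = 2 ^ k := by rw [hvl]; exact hPre
  rw [hvl, hPre]
  exact whtRec_eq_loop k v hv (2 ^ k) (Nat.pow_le_pow_right (by omega) (Nat.lt_two_pow_self).le)

-- fold-min facts about B's single pass
theorem foldB_le_init (walsh : List Int) :
    ∀ (l : List Nat) (ci : Int),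
      (l.foldl (fun ci mask =>
        if walsh.getD mask 0 ≠ 0 then min ci ((pcount mask : Int) - 1) else ci) ci) ≤ ci := by
  intro l
  induction l with
  | nil => intro ci; simp
  | cons a l ih =>
    intro ci
    simp only [List.foldl_cons]
    split
    · exact le_trans (ih _) (min_le_left _ _)
    · exact ih ci

theorem foldB_le_mem (walsh : List Int) :
    ∀ (l : List Nat) (ci : Int) (m : Nat), m ∈ l → walsh.getD m 0 ≠ 0 →
      (l.foldl (fun ci mask =>
        if walsh.getD mask 0 ≠ 0 then min ci ((pcount mask : Int) - 1) else ci) ci)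
        ≤ (pcount m : Int) - 1 := by
  intro l
  induction l with
  | nil => intro ci m hm; simp at hm
  | cons a l ih =>
    intro ci m hm hP
    simp only [List.foldl_cons]
    rcases List.mem_cons.mp hm with rfl | hm'
    · rw [if_pos hP]
      exact le_trans (foldB_le_init walsh l _) (min_le_right _ _)
    · split
      · exact ih _ m hm' hP
      · exact ih _ m hm' hP

theorem le_foldB (walsh : List Int) :
    ∀ (l : List Nat) (ci c : Int), c ≤ ci →
      (∀ m ∈ l, walsh.getD m 0 ≠ 0 → c ≤ (pcount m : Int) - 1) →
      c ≤ (l.foldl (fun ci mask =>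
        if walsh.getD mask 0 ≠ 0 then min ci ((pcount mask : Int) - 1) else ci) ci) := by
  intro l
  induction l with
  | nil => intro ci c hc _; simpa using hc
  | cons a l ih =>
    intro ci c hc hall
    simp only [List.foldl_cons]
    split
    · rename_i hP
      exact ih _ c (le_min hc (hall a (List.mem_cons_self) hP))
        (fun m hm => hall m (List.mem_cons_of_mem a hm))
    · exact ih _ c hc (fun m hm => hall m (List.mem_cons_of_mem a hm))

-- main bridge: A's per-order loop equals B's single min pass
theorem ciLoop_eq_fold (walsh : List Int) (n : Int) :
    ∀ (f : Nat) (order : Int), (n + 1 - order).toNat ≤ f →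
      1 ≤ order → order ≤ n + 1 →
      (∀ m ∈ List.range' 1 (2 ^ n.toNat - 1), walsh.getD m 0 ≠ 0 → order ≤ (pcount m : Int)) →
      (∀ m ∈ List.range' 1 (2 ^ n.toNat - 1), walsh.getD m 0 ≠ 0 → (pcount m : Int) ≤ n) →
      ciLoopAux f walsh n order (order - 1) =
        (List.range' 1 (2 ^ n.toNat - 1)).foldl
          (fun ci mask =>
            if walsh.getD mask 0 ≠ 0 then min ci ((pcount mask : Int) - 1) else ci) n := by
  have hfold_triv : ∀ (order : Int), order = n + 1 →
      (∀ m ∈ List.range' 1 (2 ^ n.toNat - 1), walsh.getD m 0 ≠ 0 → order ≤ (pcount m : Int)) →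
      (∀ m ∈ List.range' 1 (2 ^ n.toNat - 1), walsh.getD m 0 ≠ 0 → (pcount m : Int) ≤ n) →
      (List.range' 1 (2 ^ n.toNat - 1)).foldl
          (fun ci mask =>
            if walsh.getD mask 0 ≠ 0 then min ci ((pcount mask : Int) - 1) else ci) n = n := by
    intro order horder H Hub
    apply le_antisymm (foldB_le_init walsh _ n)
    apply le_foldB _ _ _ _ (le_refl n)
    intro m hm hPm
    have := H m hm hPm
    have := Hub m hm hPm
    omega
  intro f
  induction f with
  | zero =>
    intro order hf h1 hle H Hub
    have horder : order = n + 1 := by omega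
    rw [hfold_triv order horder H Hub]
    show order - 1 = n
    omega
  | succ f ih =>
    intro order hf h1 hle H Hub
    show (if order < n + 1 then
        if anyNZ walsh n order then order - 1
        else ciLoopAux f walsh n (order + 1) order
      else order - 1) = _
    by_cases hlt : order < n + 1
    · rw [if_pos hlt]
      by_cases hany : anyNZ walsh n order = true
      · rw [if_pos hany]
        simp only [anyNZ, List.any_eq_true, Bool.and_eq_true, decide_eq_true_eq] at hany
        obtain ⟨m0, hm0, ⟨⟨_, hpc⟩, hP⟩⟩ := hany
        apply le_antisymm
        · apply le_foldB
          · omega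
          · intro m hm hPm
            have := H m hm hPm
            omega
        · exact le_trans (foldB_le_mem walsh _ n m0 hm0 hP) (by omega)
      · rw [if_neg hany]
        simp only [anyNZ, List.any_eq_true, Bool.and_eq_true, decide_eq_true_eq] at hany
        push_neg at hany
        have H' : ∀ m ∈ List.range' 1 (2 ^ n.toNat - 1), walsh.getD m 0 ≠ 0 →
            order + 1 ≤ (pcount m : Int) := by
          intro m hm hPm
          obtain ⟨i, _, hmi⟩ := List.mem_range'.mp hm
          have hm1 : 1 ≤ m := by omega
          have hpos := pcount_pos m hm1
          have := hany m hm
          by_contra hcon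
          push_neg at hcon
          exact hPm (this ⟨by exact_mod_cast hpos, by omega⟩)
        have hrec := ih (order + 1) (by omega) (by omega) (by omega) H' Hub
        have e : order + 1 - 1 = order := by ring
        rw [e] at hrec
        exact hrec
    · rw [if_neg hlt]
      have horder : order = n + 1 := by omega
      rw [hfold_triv order horder H Hub]
      show order - 1 = n
      omega

-- ===== VERDICT (by name: the statement is the Claim_ definition above) =====
theorem boolean_correlation_immunity_spec : Claim_equal_boolean_correlation_immunity := by
  intro tt _ hPre
  unfold Spec_boolean_correlation_immunity
  unfold Pre_boolean_correlation_immunity at hPre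
  set k := Nat.log2 tt.length with hk
  have hlen : tt.length = 2 ^ k := hPre
  have hlen1 : 1 ≤ tt.length := by rw [hlen]; exact Nat.one_le_two_pow
  have hbl : pyBitLength tt.length = k + 1 := by rw [pyBitLength, if_neg (by omega)]
  have hn : (pyBitLength tt.length : Int) - 1 = (k : Int) := by rw [hbl]; push_cast; ring
  have hrec := boolean_walsh_eq_rec tt hPre
  have hwl : (boolean_walsh tt).length = 2 ^ k := by rw [boolean_walsh_length, hlen]
  have hwl' : (whtRec (tt.map (fun bit => if bit = 0 then (1 : Int) else -1))).length = 2 ^ k := by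
    rw [← hrec]; exact hwl
  have htn : ((k : Int)).toNat = k := Int.toNat_natCast k
  have h1' : ∀ m ∈ List.range' 1 (2 ^ k - 1), (boolean_walsh tt).getD m 0 ≠ 0 →
      (1 : Int) ≤ (pcount m : Int) := by
    intro m hm _
    obtain ⟨i, _, hmi⟩ := List.mem_range'.mp hm
    exact_mod_cast pcount_pos m (by omega)
  have hub' : ∀ m ∈ List.range' 1 (2 ^ k - 1), (boolean_walsh tt).getD m 0 ≠ 0 →
      (pcount m : Int) ≤ (k : Int) := by
    intro m hm _
    obtain ⟨i, hi, hmi⟩ := List.mem_range'.mp hm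
    have hmlt : m < 2 ^ k := by omega
    exact_mod_cast pcount_le k m hmlt
  have main := ciLoop_eq_fold (boolean_walsh tt) (k : Int) ((k : Int)).toNat 1 (by omega)
    le_rfl (by omega) (by rw [htn]; exact h1') (by rw [htn]; exact hub')
  rw [htn] at main
  show ciLoopAux ((pyBitLength tt.length : Int) - 1).toNat (boolean_walsh tt)
        ((pyBitLength tt.length : Int) - 1) 1 0 =
    (List.range' 1 ((whtRec (tt.map (fun bit => if bit = 0 then (1 : Int) else -1))).length - 1)).foldl
      (fun ci mask =>
        if (whtRec (tt.map (fun bit => if bit = 0 then (1 : Int) else -1))).getD mask 0 ≠ 0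
        then min ci ((pcount mask : Int) - 1) else ci)
      ((pyBitLength tt.length : Int) - 1)
  rw [hn, hwl', ← hrec]
  rw [show (0 : Int) = 1 - 1 from by ring]
  exact main
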